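-- pv_equiv track=rewrite | github.com/imchocoe/prg-basics | 07-Arrays/3/3-18.py | ndlarge
-- ===== SOURCE A (Python) =====
-- def ndlarge(array):
--     i=0
--     wynik=0
--     while i<len(array)-1:
--         if array[i]<array[i+1]:
--             wynik =array[i+1]
--         i+=1
--     a=wynik-1
--     if a in array:
--         win=a
--     return a
-- ===== SOURCE B (Python) =====
-- def ndlarge(array):
--     # early-exit reverse scan: first pair (from the end) with array[i] < array[i+1]
--     for i in range(len(array) - 2, -1, -1):
--         if array[i] < array[i + 1]:
--             return array[i + 1] - 1
--     return -1
-- ===== Notes on version B (the rewrite author's own statement) =====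
-- stated objective: faster
-- what changed: B scans the pairs from the end and returns array[i+1]-1 at the first (last-in-order) rising pair with an early exit and no accumulator, instead of A's forward loop that overwrites wynik on every rising pair plus a dead `a in array` membership scan; no-pair case returns -1 directly.
import Mathlib
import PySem

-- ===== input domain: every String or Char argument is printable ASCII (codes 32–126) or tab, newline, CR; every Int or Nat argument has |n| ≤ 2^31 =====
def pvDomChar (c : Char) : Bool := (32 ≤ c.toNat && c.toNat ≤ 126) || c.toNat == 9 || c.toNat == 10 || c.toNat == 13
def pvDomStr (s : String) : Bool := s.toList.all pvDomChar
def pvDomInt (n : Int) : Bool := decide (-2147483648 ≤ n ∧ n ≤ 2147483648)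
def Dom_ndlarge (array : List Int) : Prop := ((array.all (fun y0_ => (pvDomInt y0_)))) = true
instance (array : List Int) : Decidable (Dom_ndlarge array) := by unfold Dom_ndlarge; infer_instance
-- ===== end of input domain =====

-- B replaces A's forward accumulator loop (and its dead `if a in array` block) by an
-- early-exit reverse scan returning at the first rising pair from the end (objective: alternative).


-- ===== PORT A =====
-- while-loop over i = 0 .. len-2, overwriting wynik at each rising pair;
-- all indices are in range, so getD i 0 is exact for array[i] here.
def ndlarge (array : List Int) : Int :=
  let wynik : Int :=
    (List.range (array.length - 1)).foldl
      (fun w i => if array.getD i 0 < array.getD (i+1) 0 then array.getD (i+1) 0 else w) 0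
  let a := wynik - 1
  -- dead block of A: `if a in array: win = a` binds an unused local and cannot raise
  let _win : Int := if a ∈ array then a else 0
  a

-- ===== PORT B =====
-- reverse scan: fuel n means the remaining indices i = n-1, n-2, …, 0 of Source B's
-- `range(len(array)-2, -1, -1)` loop (i = fuel-1 at each step); early return on the first hit.
def ndlargeAltGo (array : List Int) : Nat → Int
  | 0 => -1
  | Nat.succ i =>
      if array.getD i 0 < array.getD (i+1) 0 then array.getD (i+1) 0 - 1
      else ndlargeAltGo array i

def ndlarge_alt (array : List Int) : Int :=
  ndlargeAltGo array (array.length - 1)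

-- ===== PRECONDITION & SPEC =====
def Spec_ndlarge (array : List Int) (out : Int) : Prop := out = ndlarge_alt array
instance (array : List Int) (out : Int) : Decidable (Spec_ndlarge array out) := by unfold Spec_ndlarge; infer_instance

-- ===== CLAIM (what is proved, stated in full; the proofs are below) =====
def Claim_equal_ndlarge : Prop := ∀ (array : List Int), Dom_ndlarge array → Spec_ndlarge array (ndlarge array)

-- ===== LEMMAS AND PROOFS =====
-- A's fold over the first n pair-indices, minus one, equals B's reverse scan with fuel n.
theorem ndlarge_fold_eq_go (array : List Int) (n : Nat) :
    ((List.range n).foldl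
      (fun w i => if array.getD i 0 < array.getD (i+1) 0 then array.getD (i+1) 0 else w) 0) - 1
    = ndlargeAltGo array n := by
  induction n with
  | zero => simp [ndlargeAltGo]
  | succ n ih =>
      rw [List.range_succ, List.foldl_append]
      simp only [List.foldl_cons, List.foldl_nil, ndlargeAltGo]
      split_ifs with h
      · rfl
      · exact ih

-- ===== VERDICT (by name: the statement is the Claim_ definition above) =====
theorem ndlarge_spec : Claim_equal_ndlarge := by
  intro array _
  unfold Spec_ndlarge ndlarge ndlarge_alt
  simpa using ndlarge_fold_eq_go array (array.length - 1)
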